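-- pv_equiv track=rewrite | github.com/H4estu/RVT_py | examples/tiled_processing/tiled_multiprocess.py | get_required_arrays
-- ===== SOURCE A (Python) =====
-- def get_required_arrays(vis_types, blend_types):
--     # Initialize dict with all possible visualizations
--     # NOTE: The keys with "_1" have to match the input values of visualizations in GUI!!!
--     req_arrays = {
--         # These are visualizations (also GENERAL for VAT):
--         "slope_1": False,
--         "hillshade_1": False,
--         "multi_hillshade_1": False,
--         "slrm_1": False,
--         "svf_1": False,  # large = FLAT = 5m
--         "opns_1": False,
--         "neg_opns_1": False,
--         "ld_1": False,
--         "sky_illumination_1": False,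
--         "shadow_horizon_1": False,
--         "msrm_1": False,
--         "mstp_1": False,
--
--         # Flat terrain:
--         "hillshade_2": False,
--         "svf_2": False,  # large = FLAT = 10m
--         "opns_2": False,
--         "neg_opns_2": False
--     }
--
--     # Update dictionary based on given visualizations:
--     for key in vis_types:
--         key = key + "_1"
--         if key in req_arrays:
--             req_arrays[key] = True
--
--     # Update dictionary based on given blends:
--     # if "VAT_3B" in blend_types:
--     #     req_arrays["svf_1"] = True
--     #     req_arrays["opns_1"] = True
--     #     req_arrays["slope_1"] = True
--
--     # if "VAT_flat_3B" in blend_types: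
--     #     req_arrays["svf_2"] = True
--     #     req_arrays["opns_2"] = True
--     #     req_arrays["slope_1"] = True
--
--     # if "VAT_combined_3B" in blend_types:
--     #     req_arrays["svf_2"] = True
--     #     req_arrays["opns_2"] = True
--     #     req_arrays["svf_1"] = True
--     #     req_arrays["opns_1"] = True
--     #     req_arrays["slope_1"] = True
--
--     if ("e3MSTP" in blend_types) or ("e2MSTP" in blend_types):
--         req_arrays["slrm_1"] = True
--         req_arrays["mstp_1"] = True
--         req_arrays["slope_1"] = True
--         req_arrays["opns_1"] = True
--         req_arrays["neg_opns_1"] = True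
--
--     if "e4MSTP" in blend_types:
--         req_arrays["ld_1"] = True
--         req_arrays["svf_1"] = True,
--         req_arrays["mstp_1"] = True
--         req_arrays["svf_2"] = True
--         req_arrays["opns_2"] = True
--         req_arrays["opns_1"] = True
--         req_arrays["neg_opns_1"] = True
--         req_arrays["slope_1"] = True
--
--     if "vat_combined_8bit" in blend_types:
--         req_arrays["svf_2"] = True
--         req_arrays["opns_2"] = True
--         req_arrays["svf_1"] = True
--         req_arrays["opns_1"] = True
--         req_arrays["slope_1"] = True
--         req_arrays["hillshade_1"] = True
--         req_arrays["hillshade_2"] = True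
--
--     if "rrim" in blend_types:
--         req_arrays["slope_1"] = True
--         req_arrays["opns_1"] = True
--         req_arrays["neg_opns_1"] = True
--
--     return req_arrays
-- ===== SOURCE B (Python) =====
-- # Per-key "pull" formulation: each output flag is one closed-form boolean over
-- # set memberships, instead of A's sequential dict mutation passes.
-- def get_required_arrays(vis_types, blend_types):
--     v = set(vis_types)
--     b = set(blend_types)
--     mstp = "e3MSTP" in b or "e2MSTP" in b
--     e4 = "e4MSTP" in b
--     vat = "vat_combined_8bit" in b
--     rrim = "rrim" in b
--     return {
--         "slope_1": "slope" in v or mstp or e4 or vat or rrim,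
--         "hillshade_1": "hillshade" in v or vat,
--         "multi_hillshade_1": "multi_hillshade" in v,
--         "slrm_1": "slrm" in v or mstp,
--         "svf_1": "svf" in v or e4 or vat,
--         "opns_1": "opns" in v or mstp or e4 or vat or rrim,
--         "neg_opns_1": "neg_opns" in v or mstp or e4 or rrim,
--         "ld_1": "ld" in v or e4,
--         "sky_illumination_1": "sky_illumination" in v,
--         "shadow_horizon_1": "shadow_horizon" in v,
--         "msrm_1": "msrm" in v,
--         "mstp_1": "mstp" in v or mstp or e4,
--         "hillshade_2": vat,
--         "svf_2": e4 or vat,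
--         "opns_2": e4 or vat,
--         "neg_opns_2": False,
--     }
-- ===== Notes on version B (the rewrite author's own statement) =====
-- stated objective: simpler
-- what changed: A mutates a dict through sequential passes (one loop over vis_types, then four conditional update blocks); B inverts the direction: it precomputes four blend flags and builds the result in one literal dict where every key's value is a single closed-form boolean formula over set memberships, with no mutation and no loop over the keys.
import Mathlib
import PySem

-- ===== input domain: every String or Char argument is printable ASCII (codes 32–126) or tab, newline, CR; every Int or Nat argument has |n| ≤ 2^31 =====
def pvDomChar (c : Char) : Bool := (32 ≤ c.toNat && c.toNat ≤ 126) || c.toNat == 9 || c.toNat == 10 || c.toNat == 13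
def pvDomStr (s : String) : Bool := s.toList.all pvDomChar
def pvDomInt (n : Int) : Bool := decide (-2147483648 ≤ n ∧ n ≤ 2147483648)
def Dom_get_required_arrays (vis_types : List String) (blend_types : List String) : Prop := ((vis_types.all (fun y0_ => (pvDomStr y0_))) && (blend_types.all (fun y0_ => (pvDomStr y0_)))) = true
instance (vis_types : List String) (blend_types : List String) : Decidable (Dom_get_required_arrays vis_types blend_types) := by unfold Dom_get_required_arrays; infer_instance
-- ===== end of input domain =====

-- B replaces A's sequential dict mutation (a vis loop plus four conditional update
-- blocks) by a single literal dict whose every value is one closed-form boolean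
-- formula over set memberships (objective: simpler).

-- ===== PORT A =====
def get_required_arrays (vis_types : List String) (blend_types : List String) : List (String × Bool) :=
  let req0 : PySem.Dict String Bool := PySem.Dict.ofList
    [("slope_1", false), ("hillshade_1", false), ("multi_hillshade_1", false), ("slrm_1", false),
     ("svf_1", false), ("opns_1", false), ("neg_opns_1", false), ("ld_1", false),
     ("sky_illumination_1", false), ("shadow_horizon_1", false), ("msrm_1", false), ("mstp_1", false),
     ("hillshade_2", false), ("svf_2", false), ("opns_2", false), ("neg_opns_2", false)]
  let req1 := vis_types.foldl (fun d key =>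
    let key := key ++ "_1"
    if d.contains key then d.insert key true else d) req0
  let req2 := if blend_types.contains "e3MSTP" || blend_types.contains "e2MSTP" then
      ((((req1.insert "slrm_1" true).insert "mstp_1" true).insert "slope_1" true).insert "opns_1" true).insert "neg_opns_1" true
    else req1
  -- NOTE: on "e4MSTP" the Python assigns the tuple (True,) to "svf_1" (trailing comma);
  -- that branch is excluded by Pre_ below, and is ported here with the bool true.
  let req3 := if blend_types.contains "e4MSTP" then
      (((((((req2.insert "ld_1" true).insert "svf_1" true).insert "mstp_1" true).insert "svf_2" true).insert "opns_2" true).insert "opns_1" true).insert "neg_opns_1" true).insert "slope_1" true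
    else req2
  let req4 := if blend_types.contains "vat_combined_8bit" then
      ((((((req3.insert "svf_2" true).insert "opns_2" true).insert "svf_1" true).insert "opns_1" true).insert "slope_1" true).insert "hillshade_1" true).insert "hillshade_2" true
    else req3
  let req5 := if blend_types.contains "rrim" then
      ((req4.insert "slope_1" true).insert "opns_1" true).insert "neg_opns_1" true
    else req4
  req5.items

-- ===== PORT B =====
def get_required_arrays_alt (vis_types : List String) (blend_types : List String) : List (String × Bool) :=
  let v : PySem.Set String := PySem.Set.ofList vis_types
  let b : PySem.Set String := PySem.Set.ofList blend_types
  let mstp := b.contains "e3MSTP" || b.contains "e2MSTP"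
  let e4 := b.contains "e4MSTP"
  let vat := b.contains "vat_combined_8bit"
  let rrim := b.contains "rrim"
  [("slope_1", v.contains "slope" || mstp || e4 || vat || rrim),
   ("hillshade_1", v.contains "hillshade" || vat),
   ("multi_hillshade_1", v.contains "multi_hillshade"),
   ("slrm_1", v.contains "slrm" || mstp),
   ("svf_1", v.contains "svf" || e4 || vat),
   ("opns_1", v.contains "opns" || mstp || e4 || vat || rrim),
   ("neg_opns_1", v.contains "neg_opns" || mstp || e4 || rrim),
   ("ld_1", v.contains "ld" || e4),
   ("sky_illumination_1", v.contains "sky_illumination"),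
   ("shadow_horizon_1", v.contains "shadow_horizon"),
   ("msrm_1", v.contains "msrm"),
   ("mstp_1", v.contains "mstp" || mstp || e4),
   ("hillshade_2", vat),
   ("svf_2", e4 || vat),
   ("opns_2", e4 || vat),
   ("neg_opns_2", false)]

-- ===== PRECONDITION & SPEC =====
-- Pre_ excludes blend_types containing "e4MSTP": there A stores the tuple (True,)
-- (a trailing-comma slip) under "svf_1", a value outside the declared bool type.
def Pre_get_required_arrays (vis_types : List String) (blend_types : List String) : Prop :=
  "e4MSTP" ∉ blend_types
instance (vis_types : List String) (blend_types : List String) : Decidable (Pre_get_required_arrays vis_types blend_types) := by unfold Pre_get_required_arrays; infer_instance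
def pvWitness_get_required_arrays : List String × List String := (["svf", "slope"], ["rrim", "e3MSTP"])

def Spec_get_required_arrays (vis_types : List String) (blend_types : List String) (out : List (String × Bool)) : Prop := out = get_required_arrays_alt vis_types blend_types
instance (vis_types : List String) (blend_types : List String) (out : List (String × Bool)) : Decidable (Spec_get_required_arrays vis_types blend_types out) := by unfold Spec_get_required_arrays; infer_instance

-- ===== CLAIM (what is proved, stated in full; the proofs are below) =====
def Claim_equal_get_required_arrays : Prop := ∀ (vis_types : List String) (blend_types : List String), Dom_get_required_arrays vis_types blend_types → Pre_get_required_arrays vis_types blend_types → Spec_get_required_arrays vis_types blend_types (get_required_arrays vis_types blend_types)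

-- ===== LEMMAS AND PROOFS =====

def pvBaseKeys : List String :=
  ["slope_1", "hillshade_1", "multi_hillshade_1", "slrm_1",
   "svf_1", "opns_1", "neg_opns_1", "ld_1",
   "sky_illumination_1", "shadow_horizon_1", "msrm_1", "mstp_1",
   "hillshade_2", "svf_2", "opns_2", "neg_opns_2"]

theorem pv_keys_step (d : PySem.Dict String Bool) (v : String)
    (h : d.keys = pvBaseKeys) :
    ((if d.contains (v ++ "_1") then d.insert (v ++ "_1") true else d).keys) = pvBaseKeys := by
  by_cases hc : d.contains (v ++ "_1") = true
  · rw [if_pos hc, PySem.Dict.keys_insert_of_contains d true hc, h]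
  · simp only [Bool.not_eq_true] at hc
    rw [hc]; simpa using h

theorem pv_keys_foldl (vis : List String) (d : PySem.Dict String Bool)
    (h : d.keys = pvBaseKeys) :
    (vis.foldl (fun d key => if d.contains (key ++ "_1") then d.insert (key ++ "_1") true else d) d).keys = pvBaseKeys := by
  induction vis generalizing d with
  | nil => simpa using h
  | cons v vs ih => exact ih _ (pv_keys_step d v h)

theorem pv_getD_foldl (vis : List String) (d : PySem.Dict String Bool) (k : String)
    (h : d.keys = pvBaseKeys) (hk : k ∈ pvBaseKeys) :
    (vis.foldl (fun d key => if d.contains (key ++ "_1") then d.insert (key ++ "_1") true else d) d).getD k false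
      = (d.getD k false || vis.any (fun v => (v ++ "_1") == k)) := by
  induction vis generalizing d with
  | nil => simp
  | cons v vs ih =>
    simp only [List.foldl_cons, List.any_cons]
    rw [ih _ (pv_keys_step d v h)]
    by_cases hc : d.contains (v ++ "_1") = true
    · rw [if_pos hc, PySem.Dict.getD_insert]
      by_cases hkv : k = v ++ "_1"
      · subst hkv; simp
      · have : ((v ++ "_1") == k) = false := by
          simpa using fun hb => hkv (hb.symm)
        simp [hkv, this]
    · simp only [Bool.not_eq_true] at hc
      rw [hc]
      have hkc : d.contains k = true := (PySem.Dict.contains_iff_mem_keys d k).2 (h ▸ hk)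
      have hne : ¬ ((v ++ "_1") == k) = true := by
        intro hb
        rw [beq_iff_eq] at hb
        rw [hb] at hc
        simp [hkc] at hc
      simp only [Bool.not_eq_true] at hne
      simp [hne]

def pvReq0 : PySem.Dict String Bool := PySem.Dict.ofList
    [("slope_1", false), ("hillshade_1", false), ("multi_hillshade_1", false), ("slrm_1", false),
     ("svf_1", false), ("opns_1", false), ("neg_opns_1", false), ("ld_1", false),
     ("sky_illumination_1", false), ("shadow_horizon_1", false), ("msrm_1", false), ("mstp_1", false),
     ("hillshade_2", false), ("svf_2", false), ("opns_2", false), ("neg_opns_2", false)]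

theorem pv_req0_keys : pvReq0.keys = pvBaseKeys := by decide

theorem pv_req0_items : pvReq0.items = pvBaseKeys.map (fun k => (k, false)) := by decide

theorem pv_req0_getD (k : String) : pvReq0.getD k false = false := by
  rw [PySem.Dict.getD_eq_get?_getD]
  cases h : PySem.Dict.get? pvReq0 k with
  | none => rfl
  | some b =>
    have hi := PySem.Dict.mem_items_of_get?_eq_some pvReq0 h
    rw [pv_req0_items] at hi
    simp only [List.mem_map] at hi
    obtain ⟨a, -, ha⟩ := hi
    cases ha
    rfl

theorem pv_keys_insert (d : PySem.Dict String Bool) (k : String)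
    (hd : d.keys = pvBaseKeys) (hk : k ∈ pvBaseKeys) :
    (d.insert k true).keys = pvBaseKeys := by
  rw [PySem.Dict.keys_insert_of_contains d true
    ((PySem.Dict.contains_iff_mem_keys d k).2 (hd ▸ hk)), hd]

def pvFoldIns (d : PySem.Dict String Bool) (ks : List String) : PySem.Dict String Bool :=
  ks.foldl (fun d k => d.insert k true) d

theorem pv_chain2 (d : PySem.Dict String Bool) :
    ((((d.insert "slrm_1" true).insert "mstp_1" true).insert "slope_1" true).insert "opns_1" true).insert "neg_opns_1" true
      = pvFoldIns d ["slrm_1", "mstp_1", "slope_1", "opns_1", "neg_opns_1"] := rfl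

theorem pv_chain3 (d : PySem.Dict String Bool) :
    ((((((d.insert "svf_2" true).insert "opns_2" true).insert "svf_1" true).insert "opns_1" true).insert "slope_1" true).insert "hillshade_1" true).insert "hillshade_2" true
      = pvFoldIns d ["svf_2", "opns_2", "svf_1", "opns_1", "slope_1", "hillshade_1", "hillshade_2"] := rfl

theorem pv_chain4 (d : PySem.Dict String Bool) :
    ((d.insert "slope_1" true).insert "opns_1" true).insert "neg_opns_1" true
      = pvFoldIns d ["slope_1", "opns_1", "neg_opns_1"] := rfl

theorem pv_foldIns_keys (ks : List String) (d : PySem.Dict String Bool)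
    (hd : d.keys = pvBaseKeys) (hks : ∀ k ∈ ks, k ∈ pvBaseKeys) :
    (pvFoldIns d ks).keys = pvBaseKeys := by
  induction ks generalizing d with
  | nil => simpa [pvFoldIns] using hd
  | cons a as ih =>
    have ha : (d.insert a true).keys = pvBaseKeys :=
      pv_keys_insert d a hd (hks a (by simp))
    simpa [pvFoldIns, List.foldl_cons] using
      ih (d.insert a true) ha (fun k hk => hks k (by simp [hk]))

theorem pv_foldIns_getD (ks : List String) (d : PySem.Dict String Bool) (k : String) :
    (pvFoldIns d ks).getD k false = (d.getD k false || ks.contains k) := by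
  induction ks generalizing d with
  | nil => simp [pvFoldIns]
  | cons a as ih =>
    have := ih (d.insert a true)
    simp only [pvFoldIns, List.foldl_cons] at this ⊢
    rw [this, PySem.Dict.getD_insert]
    by_cases hka : k = a
    · subst hka; simp
    · have : (a == k) = false := by simpa using fun hb => hka hb.symm
      simp [hka]

theorem pv_if_keys (d : PySem.Dict String Bool) (c : Bool) (ks : List String)
    (hd : d.keys = pvBaseKeys) (hks : ∀ k ∈ ks, k ∈ pvBaseKeys) :
    (if c = true then pvFoldIns d ks else d).keys = pvBaseKeys := by
  cases c with
  | false => simpa using hd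
  | true => rw [if_pos rfl]; exact pv_foldIns_keys ks d hd hks

theorem pv_if_getD (d : PySem.Dict String Bool) (c : Bool) (ks : List String) (k : String) :
    (if c = true then pvFoldIns d ks else d).getD k false
      = (d.getD k false || (c && ks.contains k)) := by
  cases c with
  | false => simp
  | true => rw [if_pos rfl, pv_foldIns_getD]; simp

theorem pv_ofList_contains (l : List String) (k : String) :
    PySem.Set.contains (PySem.Set.ofList l) k = l.contains k := by
  apply Bool.eq_iff_iff.mpr
  simp only [PySem.Set.contains, List.contains_iff_mem, PySem.Set.mem_ofList]

theorem pv_append1_inj (v s : String) : ((v ++ "_1") == (s ++ "_1")) = (v == s) := by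
  apply Bool.eq_iff_iff.mpr
  simp only [beq_iff_eq]
  constructor
  · intro h
    have := congrArg String.toList h
    simp only [String.toList_append] at this
    exact String.toList_inj.mp (List.append_cancel_right this)
  · intro h; rw [h]

theorem pv_any1 (vis : List String) (s t : String) (h : t = s ++ "_1") :
    vis.any (fun v => (v ++ "_1") == t) = vis.contains s := by
  subst h
  apply Bool.eq_iff_iff.mpr
  simp [List.any_eq_true, pv_append1_inj]

theorem pv_any2 (vis : List String) (t : String)
    (h : t.toList.reverse.head? ≠ some '1') :
    vis.any (fun v => (v ++ "_1") == t) = false := by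
  simp only [List.any_eq_false]
  intro v _
  simp only [beq_iff_eq]
  intro he
  apply h
  rw [← he]
  simp [String.toList_append]

-- ===== VERDICT (by name: the statement is the Claim_ definition above) =====
set_option maxHeartbeats 1000000 in
theorem get_required_arrays_spec : Claim_equal_get_required_arrays := by
  intro vis blend _ hpre
  have he4 : blend.contains "e4MSTP" = false := by
    simp only [Pre_get_required_arrays] at hpre
    simpa using hpre
  show get_required_arrays vis blend = get_required_arrays_alt vis blend
  unfold get_required_arrays get_required_arrays_alt
  have hfold : (PySem.Dict.ofList
    [("slope_1", false), ("hillshade_1", false), ("multi_hillshade_1", false), ("slrm_1", false),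
     ("svf_1", false), ("opns_1", false), ("neg_opns_1", false), ("ld_1", false),
     ("sky_illumination_1", false), ("shadow_horizon_1", false), ("msrm_1", false), ("mstp_1", false),
     ("hillshade_2", false), ("svf_2", false), ("opns_2", false), ("neg_opns_2", false)]
     : PySem.Dict String Bool) = pvReq0 := rfl
  simp only [he4, Bool.false_eq_true, if_false, hfold, pv_chain2, pv_ofList_contains]
  simp only [pv_chain3]
  simp only [pv_chain4]
  have hk1 := pv_keys_foldl vis pvReq0 pv_req0_keys
  have hk2 := pv_if_keys _ (blend.contains "e3MSTP" || blend.contains "e2MSTP")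
    ["slrm_1", "mstp_1", "slope_1", "opns_1", "neg_opns_1"] hk1 (by decide)
  have hk3 := pv_if_keys _ (blend.contains "vat_combined_8bit")
    ["svf_2", "opns_2", "svf_1", "opns_1", "slope_1", "hillshade_1", "hillshade_2"] hk2 (by decide)
  have hk4 := pv_if_keys _ (blend.contains "rrim")
    ["slope_1", "opns_1", "neg_opns_1"] hk3 (by decide)
  rw [PySem.Dict.items_eq_map_keys _ (by rw [hk4]; decide) false, hk4]
  have hg : ∀ k ∈ pvBaseKeys,
      (vis.foldl (fun d key => if d.contains (key ++ "_1") then d.insert (key ++ "_1") true else d) pvReq0).getD k false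
        = vis.any (fun v => (v ++ "_1") == k) := fun k hk => by
    rw [pv_getD_foldl vis pvReq0 k pv_req0_keys hk, pv_req0_getD, Bool.false_or]
  simp only [pvBaseKeys, List.map_cons, List.map_nil]
  simp only [pv_if_getD]
  rw [hg "slope_1" (by decide), hg "hillshade_1" (by decide), hg "multi_hillshade_1" (by decide),
    hg "slrm_1" (by decide), hg "svf_1" (by decide), hg "opns_1" (by decide),
    hg "neg_opns_1" (by decide), hg "ld_1" (by decide), hg "sky_illumination_1" (by decide),
    hg "shadow_horizon_1" (by decide), hg "msrm_1" (by decide), hg "mstp_1" (by decide),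
    hg "hillshade_2" (by decide), hg "svf_2" (by decide), hg "opns_2" (by decide),
    hg "neg_opns_2" (by decide)]
  simp only [pv_any1 vis "slope" "slope_1" (by decide), pv_any1 vis "hillshade" "hillshade_1" (by decide),
    pv_any1 vis "multi_hillshade" "multi_hillshade_1" (by decide), pv_any1 vis "slrm" "slrm_1" (by decide),
    pv_any1 vis "svf" "svf_1" (by decide), pv_any1 vis "opns" "opns_1" (by decide),
    pv_any1 vis "neg_opns" "neg_opns_1" (by decide), pv_any1 vis "ld" "ld_1" (by decide),
    pv_any1 vis "sky_illumination" "sky_illumination_1" (by decide),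
    pv_any1 vis "shadow_horizon" "shadow_horizon_1" (by decide),
    pv_any1 vis "msrm" "msrm_1" (by decide), pv_any1 vis "mstp" "mstp_1" (by decide),
    pv_any2 vis "hillshade_2" (by decide), pv_any2 vis "svf_2" (by decide),
    pv_any2 vis "opns_2" (by decide), pv_any2 vis "neg_opns_2" (by decide)]
  simp [Bool.or_assoc, Bool.or_comm, Bool.or_left_comm]
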